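-- pv_equiv track=rewrite | github.com/marcowhite/diploma_code | utils/misc/polls.py | get_prev_and_next_question_id
-- ===== SOURCE A (Python) =====
-- from typing import List, Tuple
--
-- def get_prev_and_next_question_id(question_id: int, questions: List[Tuple[int]]):
--     if questions[0][0] == question_id:
--         prev_question_id = None
--     else:
--         prev_question_id = [value for index, value in enumerate(questions) if value[0] < question_id][-1][0]
--
--     if questions[-1][0] == question_id:
--         next_question_id = None
--     else:
--         next_question_id = [value for index, value in enumerate(questions) if value[0] > question_id][0][0]
--     return prev_question_id, next_question_id
-- ===== SOURCE B (Python) =====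
-- from typing import List, Tuple
--
-- def get_prev_and_next_question_id(question_id: int, questions: List[Tuple[int]]):
--     need_prev = questions[0][0] != question_id
--     need_next = questions[-1][0] != question_id
--     last_smaller = None
--     first_larger = None
--     if need_prev or need_next:
--         for t in questions:
--             if t[0] < question_id:
--                 last_smaller = t
--             elif t[0] > question_id and first_larger is None:
--                 first_larger = t
--     prev_question_id = last_smaller[0] if need_prev else None
--     next_question_id = first_larger[0] if need_next else None
--     return prev_question_id, next_question_id
-- ===== Notes on version B (the rewrite author's own statement) =====
-- stated objective: alternative
-- what changed: Replaces the two filtering list comprehensions (each scanning the whole list and materialising a temporary list) by one forward pass, skipped entirely when both boundary guards hold, that tracks the last tuple whose head is below question_id and the first tuple whose head is above it.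
import Mathlib
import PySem

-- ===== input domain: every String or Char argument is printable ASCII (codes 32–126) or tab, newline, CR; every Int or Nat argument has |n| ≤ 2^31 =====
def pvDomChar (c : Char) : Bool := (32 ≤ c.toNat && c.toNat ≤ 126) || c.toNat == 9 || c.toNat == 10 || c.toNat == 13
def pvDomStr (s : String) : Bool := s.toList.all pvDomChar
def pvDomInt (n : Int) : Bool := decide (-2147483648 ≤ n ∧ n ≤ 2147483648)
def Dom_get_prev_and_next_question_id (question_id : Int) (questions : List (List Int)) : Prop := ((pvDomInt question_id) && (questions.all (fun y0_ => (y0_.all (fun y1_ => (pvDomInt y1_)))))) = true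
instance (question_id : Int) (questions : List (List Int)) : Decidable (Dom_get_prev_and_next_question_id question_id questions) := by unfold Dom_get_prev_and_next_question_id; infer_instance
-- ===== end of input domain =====

-- B replaces A's two filtering comprehensions by one forward pass (skipped when both
-- boundary guards hold) keeping the last tuple with smaller head and the first tuple
-- with larger head (O(1) extra space; same asymptotic cost).
-- ===== PORT A =====
-- Indexing: under Pre_ the outer list and the boundary tuples are nonempty and whenever
-- a comprehension runs every tuple is nonempty and the filtered list is nonempty, so
-- headI/getLastI are exactly Python's [0]/[-1] there.
def get_prev_and_next_question_id (question_id : Int) (questions : List (List Int)) : Option Int × Option Int :=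
  let prev_question_id : Option Int :=
    if questions.headI.headI = question_id then none
    else some ((questions.filter (fun v => v.headI < question_id)).getLastI.headI)
  let next_question_id : Option Int :=
    if questions.getLastI.headI = question_id then none
    else some ((questions.filter (fun v => question_id < v.headI)).headI.headI)
  (prev_question_id, next_question_id)

-- ===== PORT B =====
-- loop body of Source B: remember the last tuple with head < question_id and the first with head > it
def pvStepB (question_id : Int) (st : Option (List Int) × Option (List Int)) (t : List Int) : Option (List Int) × Option (List Int) :=
  if t.headI < question_id then (some t, st.2)
  else if question_id < t.headI ∧ st.2 = none then (st.1, some t)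
  else st

-- Source B's final `last_smaller[0]` / `first_larger[0]`: under Pre_ the option is some when
-- read, so `(·.getD default).headI` is exactly Python's `[0]` there.
def get_prev_and_next_question_id_alt (question_id : Int) (questions : List (List Int)) : Option Int × Option Int :=
  let need_prev : Bool := questions.headI.headI ≠ question_id
  let need_next : Bool := questions.getLastI.headI ≠ question_id
  let st : Option (List Int) × Option (List Int) :=
    if need_prev ∨ need_next then questions.foldl (pvStepB question_id) (none, none)
    else (none, none)
  let prev_question_id : Option Int :=
    if need_prev then some ((st.1.getD default).headI) else none
  let next_question_id : Option Int :=
    if need_next then some ((st.2.getD default).headI) else none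
  (prev_question_id, next_question_id)

-- ===== PRECONDITION & SPEC =====
-- Pre_ is exactly the inputs where A returns (it excludes only inputs on which A raises
-- IndexError): the list and both boundary tuples must be nonempty so the guards evaluate,
-- and whenever a guard fails the corresponding comprehension runs over every tuple, so
-- every tuple must be nonempty and a smaller (resp. larger) head must exist.
def Pre_get_prev_and_next_question_id (question_id : Int) (questions : List (List Int)) : Prop :=
  questions ≠ [] ∧ questions.headI ≠ [] ∧ questions.getLastI ≠ [] ∧
  (questions.headI.headI = question_id ∨
    ((∀ t ∈ questions, t ≠ []) ∧ ∃ t ∈ questions, t.headI < question_id)) ∧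
  (questions.getLastI.headI = question_id ∨
    ((∀ t ∈ questions, t ≠ []) ∧ ∃ t ∈ questions, question_id < t.headI))
instance (question_id : Int) (questions : List (List Int)) : Decidable (Pre_get_prev_and_next_question_id question_id questions) := by unfold Pre_get_prev_and_next_question_id; infer_instance

def pvWitness_get_prev_and_next_question_id : Int × List (List Int) := (2, [[1], [2], [3]])

def Spec_get_prev_and_next_question_id (question_id : Int) (questions : List (List Int)) (out : Option Int × Option Int) : Prop := out = get_prev_and_next_question_id_alt question_id questions
instance (question_id : Int) (questions : List (List Int)) (out : Option Int × Option Int) : Decidable (Spec_get_prev_and_next_question_id question_id questions out) := by unfold Spec_get_prev_and_next_question_id; infer_instance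

-- ===== CLAIM (what is proved, stated in full; the proofs are below) =====
def Claim_equal_get_prev_and_next_question_id : Prop := ∀ (question_id : Int) (questions : List (List Int)), Dom_get_prev_and_next_question_id question_id questions → Pre_get_prev_and_next_question_id question_id questions → Spec_get_prev_and_next_question_id question_id questions (get_prev_and_next_question_id question_id questions)

-- ===== LEMMAS AND PROOFS =====

lemma pvLast?_cons {α : Type} (a : α) (l : List α) :
    (a :: l).getLast? = match l.getLast? with | some x => some x | none => some a := by
  cases l with
  | nil => simp
  | cons b t =>
    rw [List.getLast?_cons_cons]
    cases h : (b :: t).getLast? with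
    | none => simp [List.getLast?_eq_none_iff] at h
    | some x => rfl

lemma pvLoop_eq (question_id : Int) (qs : List (List Int)) :
    ∀ (ls fl : Option (List Int)),
    qs.foldl (pvStepB question_id) (ls, fl) =
      ((match (qs.filter (fun v => v.headI < question_id)).getLast? with
        | some t => some t | none => ls),
       (match fl with
        | some x => some x
        | none => (qs.filter (fun v => question_id < v.headI)).head?)) := by
  induction qs with
  | nil => intro ls fl; cases fl <;> simp
  | cons h t ih =>
    intro ls fl
    rw [List.foldl_cons]
    by_cases hlt : h.headI < question_id
    · have hgt : ¬ question_id < h.headI := by omega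
      have e1 : (h :: t).filter (fun v => decide (v.headI < question_id)) =
          h :: t.filter (fun v => decide (v.headI < question_id)) := by
        simp [hlt]
      have e2 : (h :: t).filter (fun v => decide (question_id < v.headI)) =
          t.filter (fun v => decide (question_id < v.headI)) := by
        simp [hgt]
      have estep : pvStepB question_id (ls, fl) h = (some h, fl) := by
        simp [pvStepB, hlt]
      rw [estep, ih, e1, e2, pvLast?_cons]
      cases (t.filter (fun v => decide (v.headI < question_id))).getLast? <;> rfl
    · by_cases hgt : question_id < h.headI
      · have e1 : (h :: t).filter (fun v => decide (v.headI < question_id)) =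
            t.filter (fun v => decide (v.headI < question_id)) := by
          simp [hlt]
        have e2 : (h :: t).filter (fun v => decide (question_id < v.headI)) =
            h :: t.filter (fun v => decide (question_id < v.headI)) := by
          simp [hgt]
        cases fl with
        | none =>
          have estep : pvStepB question_id (ls, none) h = (ls, some h) := by
            simp [pvStepB, hlt, hgt]
          rw [estep, ih, e1, e2]
          rfl
        | some x =>
          have estep : pvStepB question_id (ls, some x) h = (ls, some x) := by
            simp [pvStepB, hlt]
          rw [estep, ih, e1]
      · have e1 : (h :: t).filter (fun v => decide (v.headI < question_id)) =
            t.filter (fun v => decide (v.headI < question_id)) := by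
          simp [hlt]
        have e2 : (h :: t).filter (fun v => decide (question_id < v.headI)) =
            t.filter (fun v => decide (question_id < v.headI)) := by
          simp [hgt]
        have estep : pvStepB question_id (ls, fl) h = (ls, fl) := by
          simp [pvStepB, hlt, hgt]
        rw [estep, ih, e1, e2]

lemma pvFilter_ne_nil {p : List Int → Prop} [DecidablePred p] {qs : List (List Int)}
    (h : ∃ t ∈ qs, p t) : qs.filter (fun v => p v) ≠ [] := by
  intro hnil
  rw [List.filter_eq_nil_iff] at hnil
  obtain ⟨t, ht, hp⟩ := h
  exact absurd (by simpa using hp) (by simpa using hnil t ht)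

lemma pvGetLast?_eq {α : Type} [Inhabited α] {l : List α} (h : l ≠ []) :
    l.getLast? = some l.getLastI := by
  rw [List.getLastI_eq_getLast?_getD]
  cases hl : l.getLast? with
  | none => rw [List.getLast?_eq_none_iff] at hl; exact absurd hl h
  | some x => rfl

lemma pvHead?_eq {α : Type} [Inhabited α] {l : List α} (h : l ≠ []) :
    l.head? = some l.headI := by
  cases l with
  | nil => exact absurd rfl h
  | cons a t => rfl

-- ===== VERDICT (by name: the statement is the Claim_ definition above) =====
theorem get_prev_and_next_question_id_spec : Claim_equal_get_prev_and_next_question_id := by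
  intro qid qs _ hpre
  obtain ⟨hne, hh, hl, hprev, hnext⟩ := hpre
  unfold Spec_get_prev_and_next_question_id get_prev_and_next_question_id get_prev_and_next_question_id_alt
  by_cases hg1 : qs.headI.headI = qid <;> by_cases hg2 : qs.getLastI.headI = qid
  · simp [hg1, hg2]
  · have hfne : qs.filter (fun v => qid < v.headI) ≠ [] :=
      pvFilter_ne_nil ((hnext.resolve_left hg2).2)
    simp [hg1, hg2, pvLoop_eq, pvHead?_eq hfne]
  · have hfnep : qs.filter (fun v => v.headI < qid) ≠ [] :=
      pvFilter_ne_nil ((hprev.resolve_left hg1).2)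
    simp [hg1, hg2, pvLoop_eq, pvGetLast?_eq hfnep]
  · have hfne : qs.filter (fun v => qid < v.headI) ≠ [] :=
      pvFilter_ne_nil ((hnext.resolve_left hg2).2)
    have hfnep : qs.filter (fun v => v.headI < qid) ≠ [] :=
      pvFilter_ne_nil ((hprev.resolve_left hg1).2)
    simp [hg1, hg2, pvLoop_eq, pvGetLast?_eq hfnep, pvHead?_eq hfne]
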